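-- pv_equiv track=rewrite | github.com/altarim992/CS112-Spring2012 | hw10/rects.py | poly_in_rect
-- ===== SOURCE A (Python) =====
-- def poly_in_rect(poly, rect):
--     in_rect = True
--     xlist = []
--     ylist = []
--     for x, y in poly:
--         xlist.append(x)
--         ylist.append(y)
--     for xval in xlist:
--         if xval < rect[0]:
--             in_rect = False
--         elif xval > (rect[2] + rect[0]):
--             in_rect = False
--     for yval in ylist:
--         if yval < rect[1]:
--             in_rect = False
--         elif yval > (rect[3] + rect[1]):
--             in_rect = False
--     if in_rect == False:
--         return False
--     else:
--         return True
-- ===== SOURCE B (Python) =====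
-- def poly_in_rect(poly, rect):
--     x0, y0, w, h = rect[0], rect[1], rect[2], rect[3]
--     return all(x0 <= x <= x0 + w and y0 <= y <= y0 + h for x, y in poly)
-- ===== Notes on version B (the rewrite author's own statement) =====
-- stated objective: simpler
-- what changed: Replaced the three sequential passes (build xlist/ylist, then scan each with an in_rect flag) by one short-circuiting all() over poly checking both bounds per point.
import Mathlib
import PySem

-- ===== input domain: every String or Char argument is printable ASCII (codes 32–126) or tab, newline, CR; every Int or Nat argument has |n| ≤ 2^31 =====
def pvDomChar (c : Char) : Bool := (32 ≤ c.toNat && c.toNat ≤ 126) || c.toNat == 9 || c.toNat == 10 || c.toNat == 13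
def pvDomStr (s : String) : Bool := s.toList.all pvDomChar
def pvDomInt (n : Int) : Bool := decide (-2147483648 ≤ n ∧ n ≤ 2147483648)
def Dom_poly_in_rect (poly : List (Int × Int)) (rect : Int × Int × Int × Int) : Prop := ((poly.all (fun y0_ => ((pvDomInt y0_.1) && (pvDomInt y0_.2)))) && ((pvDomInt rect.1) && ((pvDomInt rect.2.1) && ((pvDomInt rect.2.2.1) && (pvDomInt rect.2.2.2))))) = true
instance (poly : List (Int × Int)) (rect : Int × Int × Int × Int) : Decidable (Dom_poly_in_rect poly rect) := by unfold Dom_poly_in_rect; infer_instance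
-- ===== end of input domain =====

-- B replaces A's three full passes (collect xs/ys, then flag-scan each) by one all() pass checking both bounds per point: simpler, same cost.
-- ===== PORT A =====
def poly_in_rect (poly : List (Int × Int)) (rect : Int × Int × Int × Int) : Bool :=
  -- in_rect = True; xlist = []; ylist = []; for x, y in poly: append
  let lists := poly.foldl (fun (acc : List Int × List Int) xy =>
    (acc.1 ++ [xy.1], acc.2 ++ [xy.2])) ([], [])
  let xlist := lists.1
  let ylist := lists.2
  -- for xval in xlist: …
  let in_rect := xlist.foldl (fun b xval =>
    if xval < rect.1 then false
    else if xval > (rect.2.2.1 + rect.1) then false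
    else b) true
  -- for yval in ylist: …
  let in_rect := ylist.foldl (fun b yval =>
    if yval < rect.2.1 then false
    else if yval > (rect.2.2.2 + rect.2.1) then false
    else b) in_rect
  if in_rect = false then false else true

-- ===== PORT B =====
def poly_in_rect_alt (poly : List (Int × Int)) (rect : Int × Int × Int × Int) : Bool :=
  let x0 := rect.1; let y0 := rect.2.1; let w := rect.2.2.1; let h := rect.2.2.2
  poly.all (fun xy => decide (x0 ≤ xy.1 ∧ xy.1 ≤ x0 + w) && decide (y0 ≤ xy.2 ∧ xy.2 ≤ y0 + h))

-- ===== PRECONDITION & SPEC =====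
def Spec_poly_in_rect (poly : List (Int × Int)) (rect : Int × Int × Int × Int) (out : Bool) : Prop := out = poly_in_rect_alt poly rect
instance (poly : List (Int × Int)) (rect : Int × Int × Int × Int) (out : Bool) : Decidable (Spec_poly_in_rect poly rect out) := by unfold Spec_poly_in_rect; infer_instance

-- ===== CLAIM (what is proved, stated in full; the proofs are below) =====
def Claim_equal_poly_in_rect : Prop := ∀ (poly : List (Int × Int)) (rect : Int × Int × Int × Int), Dom_poly_in_rect poly rect → Spec_poly_in_rect poly rect (poly_in_rect poly rect)

-- ===== LEMMAS AND PROOFS =====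

-- ===== VERDICT (by name: the statement is the Claim_ definition above) =====
-- The flag-setting scan equals "b && every element in bounds".
theorem pv_fold_flag (lo hi : Int) (l : List Int) (b : Bool) :
    l.foldl (fun b v => if v < lo then false else if v > hi then false else b) b
      = (b && l.all (fun v => decide (lo ≤ v ∧ v ≤ hi))) := by
  induction l generalizing b with
  | nil => simp
  | cons v t ih =>
    simp only [List.foldl_cons, List.all_cons, ih]
    by_cases h1 : v < lo
    · have : (decide (lo ≤ v ∧ v ≤ hi)) = false := by simp; omega
      simp [h1, this]
    · by_cases h2 : v > hi
      · have : (decide (lo ≤ v ∧ v ≤ hi)) = false := by simp; omega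
        simp [h1, h2, this]
      · have : (decide (lo ≤ v ∧ v ≤ hi)) = true := by simp; omega
        simp [h1, h2, this]

theorem pv_lists (poly : List (Int × Int)) :
    poly.foldl (fun (acc : List Int × List Int) xy =>
      (acc.1 ++ [xy.1], acc.2 ++ [xy.2])) ([], [])
      = (poly.map Prod.fst, poly.map Prod.snd) := by
  have h : ∀ (a1 a2 : List Int),
      poly.foldl (fun (acc : List Int × List Int) xy =>
        (acc.1 ++ [xy.1], acc.2 ++ [xy.2])) (a1, a2)
        = (a1 ++ poly.map Prod.fst, a2 ++ poly.map Prod.snd) := by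
    induction poly with
    | nil => simp
    | cons p t ih => intro a1 a2; simp [ih]
  simpa using h [] []

theorem pv_all_split (l : List (Int × Int)) (px py : Int → Bool) :
    ((l.map Prod.fst).all px && (l.map Prod.snd).all py)
      = l.all (fun xy => px xy.1 && py xy.2) := by
  induction l with
  | nil => simp
  | cons p t ih =>
    simp only [List.map_cons, List.all_cons, ← ih]
    cases px p.1 <;> cases py p.2 <;>
      simp [Bool.and_comm, Bool.and_left_comm]

theorem poly_in_rect_spec : Claim_equal_poly_in_rect := by
  intro poly rect _
  unfold Spec_poly_in_rect poly_in_rect poly_in_rect_alt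
  simp only [pv_lists, pv_fold_flag, Bool.true_and, pv_all_split]
  rw [Int.add_comm rect.2.2.1 rect.1, Int.add_comm rect.2.2.2 rect.2.1]
  split <;> simp_all
  rename_i h
  intro a b hab
  have := h a b hab
  tauto
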